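-- pv_equiv track=rewrite | github.com/kurosawa4434/checkio-mission-delivery-drone | verification/my_solution.py | delivery_drone
-- ===== SOURCE A (Python) =====
-- from itertools import accumulate
-- from typing import List
--
-- def delivery_drone(orders: List[int]) -> int:
--
--     result_way = [[]]
--     orders = [(i, d) for i, d in enumerate(orders) if d]
--
--     def search(rest_points, way, cur=0, min_way=99999):
--
--         cur_way = sum(map(abs, way))
--
--         if min_way < cur_way:
--             return min_way
--
--         if not rest_points:
--             cur_way += cur
--
--             if min_way > cur_way:
--                 result_way[0] = way + [-cur]
--
--             return [min_way, cur_way][min_way > cur_way]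
--
--         for i, (p, t) in enumerate(rest_points):
--             min_way = search(rest_points[:i]+rest_points[i+1:],
--                                 way+[p-cur, t-p], t, min_way)
--
--         return min_way
--
--     rs = search(orders, [])
--     steps = list(accumulate(result_way[0]))
--
--     return rs, steps
-- ===== SOURCE B (Python) =====
-- from typing import List
--
--
-- def delivery_drone(orders: List[int]) -> int:
--     # Iterative depth-first search with an explicit stack instead of recursion;
--     # each stack entry carries its travelled-cost sum incrementally, so the
--     # path cost is never re-summed from scratch.
--     points = [(i, d) for i, d in enumerate(orders) if d]
--     best, best_way = 99999, []
--     stack = [(points, [], 0, 0)]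
--     while stack:
--         rest, way, cur, cost = stack.pop()
--         if best < cost:
--             continue
--         if not rest:
--             total = cost + cur
--             if best > total:
--                 best, best_way = total, way + [-cur]
--             continue
--         for i in range(len(rest) - 1, -1, -1):
--             p, t = rest[i]
--             stack.append((rest[:i] + rest[i + 1:],
--                           way + [p - cur, t - p], t,
--                           cost + abs(p - cur) + abs(t - p)))
--     steps, pos = [], 0
--     for d in best_way:
--         pos += d
--         steps.append(pos)
--     return best, steps
-- ===== Notes on version B (the rewrite author's own statement) =====
-- stated objective: alternative
-- what changed: The recursive branch-and-bound with a mutable result cell is replaced by an iterative explicit-stack depth-first search whose stack entries carry the travelled-cost sum incrementally, so no recursion, no closure, and no re-summing of the path at every node.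
import Mathlib
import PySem

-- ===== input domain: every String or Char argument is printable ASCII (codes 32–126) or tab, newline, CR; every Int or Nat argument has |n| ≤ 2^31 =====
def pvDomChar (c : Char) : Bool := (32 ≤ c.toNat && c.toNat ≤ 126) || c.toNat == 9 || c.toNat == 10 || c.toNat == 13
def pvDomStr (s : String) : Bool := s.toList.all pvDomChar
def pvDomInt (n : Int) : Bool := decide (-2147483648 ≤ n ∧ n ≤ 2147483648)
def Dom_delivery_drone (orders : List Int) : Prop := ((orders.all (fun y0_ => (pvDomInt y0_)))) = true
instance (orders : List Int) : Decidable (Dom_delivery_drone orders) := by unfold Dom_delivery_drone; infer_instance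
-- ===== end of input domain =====

-- B replaces A's recursive branch-and-bound (mutable result cell, re-summed path
-- cost) with an iterative explicit-stack DFS carrying the cost incrementally;
-- same exact result, proved equal on all inputs (objective: alternative).

-- ===== PORT A =====
-- `for i,(p,t) in enumerate(rest)` with the recursive call threading min_way and
-- the result_way cell as explicit (minWay, result) state.
-- rest[:i]+rest[i+1:] ported as take/drop, exact for the nonnegative i enumerate yields.
theorem pvEnumLenEq {rest : List (Int × Int)} {x : Int × (Int × Int)}
    (hx : x ∈ PySem.List.enumerate rest) :
    (rest.take x.1.toNat ++ rest.drop (x.1.toNat + 1)).length + 1 = rest.length := by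
  rcases (PySem.List.mem_enumerate_iff _ _ _).1 hx with ⟨k, hk, hpk⟩
  have : x.1.toNat = k := by rw [hpk]; simp
  simp [List.length_take, List.length_drop, this]
  omega

def searchA (rest : List (Int × Int)) (way : List Int) (cur : Int)
    (minWay : Int) (result : List Int) : Int × List Int :=
  let curWay := (way.map (fun x => |x|)).sum
  if minWay < curWay then (minWay, result)
  else if rest = [] then
    let curWay2 := curWay + cur
    if minWay > curWay2 then (curWay2, way ++ [-cur]) else (minWay, result)
  else
    ((PySem.List.enumerate rest).attach).foldl
      (fun st x =>
        searchA (rest.take x.1.1.toNat ++ rest.drop (x.1.1.toNat + 1))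
          (way ++ [x.1.2.1 - cur, x.1.2.2 - x.1.2.1]) x.1.2.2 st.1 st.2)
      (minWay, result)
termination_by rest.length
decreasing_by exact Nat.lt_of_succ_le (Nat.le_of_eq (pvEnumLenEq x.2))

-- list(accumulate(xs)) : running sums
def pyAccumulateA (xs : List Int) : List Int :=
  (xs.foldl (fun (st : Int × List Int) x => (st.1 + x, st.2 ++ [st.1 + x])) (0, [])).2

def delivery_drone (orders : List Int) : Int × List Int :=
  let pts := ((PySem.List.enumerate orders).filter (fun x => x.2 ≠ 0))
  let r := searchA pts [] 0 99999 []
  (r.1, pyAccumulateA r.2)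

-- ===== PORT B =====
-- one stack entry = (rest, way, cur, cost); Python pushes children with i
-- descending and pops from the end, so pop order = this ascending-i list
-- prepended to the stack (head = top of stack).
def pvNodes : Nat → Nat
  | 0 => 1
  | k + 1 => 1 + (k + 1) * pvNodes k

abbrev pvTask : Type := List (Int × Int) × List Int × Int × Int

def pvMeasure (stack : List pvTask) : Nat :=
  (stack.map (fun t => pvNodes t.1.length)).sum

theorem pvNodes_pos (k : Nat) : 0 < pvNodes k := by
  cases k <;> simp [pvNodes]

theorem pvMeasure_append (a b : List pvTask) : pvMeasure (a ++ b) = pvMeasure a + pvMeasure b := by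
  simp [pvMeasure]

theorem pvMeasure_cons (t : pvTask) (s : List pvTask) :
    pvMeasure (t :: s) = pvNodes t.1.length + pvMeasure s := by
  simp [pvMeasure]

theorem pvMeasure_le_of_len (T : List pvTask) (m : Nat) (h : ∀ t ∈ T, t.1.length = m) :
    pvMeasure T ≤ T.length * pvNodes m := by
  induction T with
  | nil => simp [pvMeasure]
  | cons a T ih =>
    have ha := h a List.mem_cons_self
    have hT := ih (fun b hb => h b (List.mem_cons_of_mem _ hb))
    rw [pvMeasure_cons, ha, List.length_cons, Nat.succ_mul]
    omega

def pvChildren (rest : List (Int × Int)) (way : List Int) (cur cost : Int) : List pvTask :=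
  ((PySem.List.enumerate rest).attach).map
    (fun x =>
      ((rest.take x.1.1.toNat ++ rest.drop (x.1.1.toNat + 1),
        way ++ [x.1.2.1 - cur, x.1.2.2 - x.1.2.1], x.1.2.2,
        cost + |x.1.2.1 - cur| + |x.1.2.2 - x.1.2.1|) : pvTask))

theorem pvChildren_task_len (rest : List (Int × Int)) (way : List Int) (cur cost : Int) :
    ∀ t ∈ pvChildren rest way cur cost, t.1.length = rest.length - 1 := by
  intro t ht
  rcases List.mem_map.1 ht with ⟨x, hx, rfl⟩
  have h := pvEnumLenEq x.2
  show (rest.take x.1.1.toNat ++ rest.drop (x.1.1.toNat + 1)).length = rest.length - 1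
  omega

theorem pvChildren_length (rest : List (Int × Int)) (way : List Int) (cur cost : Int) :
    (pvChildren rest way cur cost).length = rest.length := by
  simp [pvChildren, PySem.List.length_enumerate]

theorem pvNodes_mul_lt (n : Nat) (hn : n ≠ 0) : n * pvNodes (n - 1) < pvNodes n := by
  cases n with
  | zero => exact absurd rfl hn
  | succ k =>
    have h : pvNodes (k + 1) = 1 + (k + 1) * pvNodes k := rfl
    simp only [Nat.add_sub_cancel]
    omega

theorem pvChildren_lt (rest : List (Int × Int)) (way : List Int) (cur cost : Int)
    (hne : rest ≠ []) :
    pvMeasure (pvChildren rest way cur cost) < pvNodes rest.length := by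
  have h1 := pvMeasure_le_of_len _ _ (pvChildren_task_len rest way cur cost)
  rw [pvChildren_length] at h1
  exact lt_of_le_of_lt h1 (pvNodes_mul_lt rest.length (by simpa using hne))

theorem pvDecPop (t : pvTask) (stk : List pvTask) :
    pvMeasure stk < pvMeasure (t :: stk) := by
  rw [pvMeasure_cons]
  exact Nat.lt_add_of_pos_left (pvNodes_pos _)

theorem pvDecExpand (rest : List (Int × Int)) (way : List Int) (cur cost : Int)
    (stk : List pvTask) (hne : ¬ rest = []) :
    pvMeasure (pvChildren rest way cur cost ++ stk)
      < pvMeasure (((rest, way, cur, cost) : pvTask) :: stk) := by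
  rw [pvMeasure_append, pvMeasure_cons]
  exact Nat.add_lt_add_right (pvChildren_lt rest way cur cost hne) _

def droneLoop (stack : List pvTask) (best : Int) (bestWay : List Int) : Int × List Int :=
  match stack with
  | [] => (best, bestWay)
  | (rest, way, cur, cost) :: stk =>
    if best < cost then droneLoop stk best bestWay
    else if rest = [] then
      let total := cost + cur
      if best > total then droneLoop stk total (way ++ [-cur])
      else droneLoop stk best bestWay
    else
      droneLoop
        (((PySem.List.enumerate rest).attach).map
          (fun x =>
            ((rest.take x.1.1.toNat ++ rest.drop (x.1.1.toNat + 1),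
              way ++ [x.1.2.1 - cur, x.1.2.2 - x.1.2.1], x.1.2.2,
              cost + |x.1.2.1 - cur| + |x.1.2.2 - x.1.2.1|) : pvTask))
          ++ stk) best bestWay
termination_by pvMeasure stack
decreasing_by
  · exact pvDecPop _ stk
  · exact pvDecPop _ stk
  · exact pvDecPop _ stk
  · rename_i hne
    exact pvDecExpand rest way cur cost stk hne

-- running-position loop: steps/pos accumulator ported as recursion on the way list
def runningSums : List Int → Int → List Int
  | [], _ => []
  | d :: ds, pos => (pos + d) :: runningSums ds (pos + d)

def delivery_drone_alt (orders : List Int) : Int × List Int :=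
  let pts := ((PySem.List.enumerate orders).filter (fun x => x.2 ≠ 0))
  let r := droneLoop [(pts, [], 0, 0)] 99999 []
  (r.1, runningSums r.2 0)

-- ===== PRECONDITION & SPEC =====
def Spec_delivery_drone (orders : List Int) (out : Int × List Int) : Prop := out = delivery_drone_alt orders
instance (orders : List Int) (out : Int × List Int) : Decidable (Spec_delivery_drone orders out) := by unfold Spec_delivery_drone; infer_instance

-- ===== CLAIM (what is proved, stated in full; the proofs are below) =====
def Claim_equal_delivery_drone : Prop := ∀ (orders : List Int), Dom_delivery_drone orders → Spec_delivery_drone orders (delivery_drone orders)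

-- ===== LEMMAS AND PROOFS =====

-- invariant: a task's stored cost is the abs-sum of its way
def pvInv (t : pvTask) : Prop := t.2.2.2 = ((t.2.1).map (fun x => |x|)).sum

def pvStep (st : Int × List Int) (t : pvTask) : Int × List Int :=
  searchA t.1 t.2.1 t.2.2.1 st.1 st.2

theorem pvChildren_inv (rest : List (Int × Int)) (way : List Int) (cur cost : Int)
    (hc : cost = (way.map (fun x => |x|)).sum) :
    ∀ t ∈ pvChildren rest way cur cost, pvInv t := by
  intro t ht
  rcases List.mem_map.1 ht with ⟨x, hx, rfl⟩
  simp [pvInv, hc]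
  ring

theorem pvStep_head (rest : List (Int × Int)) (way : List Int) (cur cost b : Int)
    (p : List Int) (hc : cost = (way.map (fun x => |x|)).sum) (h1 : ¬ b < cost)
    (h2 : rest ≠ []) :
    pvStep (b, p) ((rest, way, cur, cost) : pvTask) =
      (pvChildren rest way cur cost).foldl pvStep (b, p) := by
  simp only [pvStep, pvChildren]
  rw [searchA, List.foldl_map]
  simp only [← hc, if_neg h1, if_neg h2, pvStep]

theorem pv_loop_append : ∀ (n : Nat) (T S : List pvTask) (b : Int) (p : List Int),
    pvMeasure T = n → (∀ t ∈ T, pvInv t) →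
    droneLoop (T ++ S) b p =
      droneLoop S (T.foldl pvStep (b, p)).1 (T.foldl pvStep (b, p)).2 := by
  intro n
  induction n using Nat.strong_induction_on with
  | _ n ih =>
    intro T S b p hm hinv
    match T with
    | [] => simp
    | (rest, way, cur, cost) :: T' =>
      have hc : cost = (way.map (fun x => |x|)).sum := hinv _ List.mem_cons_self
      have hinv' : ∀ t ∈ T', pvInv t := fun t ht => hinv t (List.mem_cons_of_mem _ ht)
      have hmc : pvMeasure (((rest, way, cur, cost) : pvTask) :: T')
          = pvNodes rest.length + pvMeasure T' := by simp [pvMeasure]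
      have hmT' : pvMeasure T' < n := by
        have := pvNodes_pos rest.length
        omega
      rw [List.cons_append, droneLoop, List.foldl_cons]
      by_cases h1 : b < cost
      · rw [if_pos h1]
        have hs : pvStep (b, p) ((rest, way, cur, cost) : pvTask) = (b, p) := by
          simp only [pvStep]
          rw [searchA]
          simp only [← hc, if_pos h1]
        rw [hs]
        exact ih _ hmT' T' S b p rfl hinv'
      · rw [if_neg h1]
        by_cases h2 : rest = []
        · subst h2
          rw [if_pos rfl]
          have hs : pvStep (b, p) (([], way, cur, cost) : pvTask) =
              if b > cost + cur then (cost + cur, way ++ [-cur]) else (b, p) := by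
            simp only [pvStep]
            rw [searchA]
            simp only [← hc, if_neg h1]
            simp
          rw [hs]
          by_cases h3 : b > cost + cur
          · rw [if_pos h3, if_pos h3]
            exact ih _ hmT' T' S _ _ rfl hinv'
          · rw [if_neg h3, if_neg h3]
            exact ih _ hmT' T' S b p rfl hinv'
        · rw [if_neg h2]
          have hlt : pvMeasure (pvChildren rest way cur cost ++ T') < n := by
            rw [pvMeasure_append]
            have := pvChildren_lt rest way cur cost h2
            omega
          have hinvC : ∀ t ∈ pvChildren rest way cur cost ++ T', pvInv t := by
            intro t ht
            rcases List.mem_append.1 ht with h | h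
            · exact pvChildren_inv rest way cur cost hc t h
            · exact hinv' t h
          have happ : pvChildren rest way cur cost ++ (T' ++ S) =
              (pvChildren rest way cur cost ++ T') ++ S := by
            rw [List.append_assoc]
          have hih := ih _ hlt (pvChildren rest way cur cost ++ T') S b p rfl hinvC
          rw [show (((PySem.List.enumerate rest).attach).map
              (fun x =>
                ((rest.take x.1.1.toNat ++ rest.drop (x.1.1.toNat + 1),
                  way ++ [x.1.2.1 - cur, x.1.2.2 - x.1.2.1], x.1.2.2,
                  cost + |x.1.2.1 - cur| + |x.1.2.2 - x.1.2.1|) : pvTask)))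
              = pvChildren rest way cur cost from rfl, happ, hih,
            List.foldl_append, pvStep_head rest way cur cost b p hc h1 h2]

theorem pvAcc_eq_aux (xs : List Int) : ∀ (acc : Int) (ys : List Int),
    (xs.foldl (fun (st : Int × List Int) x => (st.1 + x, st.2 ++ [st.1 + x])) (acc, ys)).2
      = ys ++ runningSums xs acc := by
  induction xs with
  | nil => intro acc ys; simp [runningSums]
  | cons d ds ih =>
    intro acc ys
    simp only [List.foldl_cons, runningSums, ih, List.append_assoc, List.singleton_append]

theorem pvAcc_eq (xs : List Int) : pyAccumulateA xs = runningSums xs 0 := by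
  unfold pyAccumulateA
  rw [pvAcc_eq_aux]
  simp

-- ===== VERDICT (by name: the statement is the Claim_ definition above) =====
theorem delivery_drone_spec : Claim_equal_delivery_drone := by
  intro orders _
  unfold Spec_delivery_drone delivery_drone delivery_drone_alt
  have h := pv_loop_append
    (pvMeasure [((((PySem.List.enumerate orders).filter (fun x => x.2 ≠ 0)), [], 0, 0) : pvTask)])
    [((((PySem.List.enumerate orders).filter (fun x => x.2 ≠ 0)), [], 0, 0) : pvTask)] [] 99999 []
    rfl (by rintro t ht; rcases List.mem_singleton.1 ht with rfl; simp [pvInv])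
  simp only [List.append_nil, List.foldl_cons, List.foldl_nil] at h
  dsimp only
  rw [h, droneLoop, pvAcc_eq]
  rfl
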